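-- pv_equiv track=rewrite | github.com/ipeterov/random-stuff | Другое/shuffles.py | find_equivalent_operations
-- ===== SOURCE A (Python) =====
-- def are_same(operation1, operation2, arr_len):
--     arr1 = list(range(arr_len))
--     arr2 = list(range(arr_len))
--
--     for swap in operation1:
--         arr1[swap[0]], arr1[swap[1]] = arr1[swap[1]], arr1[swap[0]]
--
--     for swap in operation2:
--         arr2[swap[0]], arr2[swap[1]] = arr2[swap[1]], arr2[swap[0]]
--
--     if arr1 == arr2:
--         return True
--     else:
--         return False
--
-- def find_equivalent_operations(operation, arr_len):
--     all_swaps = []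
--     for i in range(arr_len):
--         for j in range(arr_len):
--             if i != j and (i, j) not in all_swaps and (j, i) not in all_swaps:
--                 all_swaps.append((i, j))
--
--     equal_operations = []
--     for elem1 in all_swaps:
--         for elem2 in all_swaps:
--             current_operation = (elem1, elem2)
--             if are_same(operation, current_operation, arr_len):
--                 equal_operations.append(current_operation)
--             for elem3 in all_swaps:
--                 current_operation = (elem1, elem2, elem3)
--                 if are_same(operation, current_operation, arr_len):
--                     equal_operations.append(current_operation)
--                 for elem4 in all_swaps:
--                     current_operation = (elem1, elem2, elem3, elem4)
--                     if are_same(operation, current_operation, arr_len):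
--                         equal_operations.append(current_operation)
--                     for elem5 in all_swaps:
--                         current_operation = (elem1, elem2, elem3, elem4, elem5)
--                         if are_same(operation, current_operation, arr_len):
--                             equal_operations.append(current_operation)
--
--
--
--     return equal_operations
-- ===== SOURCE B (Python) =====
-- def find_equivalent_operations(operation, arr_len):
--     # Precompute the target permutation once, then DFS over swap prefixes,
--     # applying each swap incrementally (and undoing it) instead of rebuilding
--     # both arrays from scratch for every candidate sequence.
--     if arr_len < 2:
--         return []  # no swap pairs exist, so no candidate sequences
--
--     target = list(range(arr_len))
--     for a, b in operation:
--         target[a], target[b] = target[b], target[a]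
--
--     swaps = [(i, j) for i in range(arr_len) for j in range(i + 1, arr_len)]
--
--     results = []
--     arr = list(range(arr_len))
--     prefix = []
--
--     def dfs():
--         if len(prefix) >= 2 and arr == target:
--             results.append(tuple(prefix))
--         if len(prefix) < 5:
--             for a, b in swaps:
--                 arr[a], arr[b] = arr[b], arr[a]
--                 prefix.append((a, b))
--                 dfs()
--                 prefix.pop()
--                 arr[a], arr[b] = arr[b], arr[a]
--
--     dfs()
--     return results
-- ===== Notes on version B (the rewrite author's own statement) =====
-- stated objective: alternative
-- what changed: B precomputes the target permutation once and runs a recursive DFS over swap prefixes, applying each swap incrementally to one running array and comparing it to the target, instead of A's four nested loops that rebuild and re-permute two fresh arrays (re-applying the whole input operation) for every candidate sequence; B also enumerates the i<j swap pairs directly instead of A's membership-scanned construction, and returns [] at once when arr_len < 2 (no swap pairs exist).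
import Mathlib
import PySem

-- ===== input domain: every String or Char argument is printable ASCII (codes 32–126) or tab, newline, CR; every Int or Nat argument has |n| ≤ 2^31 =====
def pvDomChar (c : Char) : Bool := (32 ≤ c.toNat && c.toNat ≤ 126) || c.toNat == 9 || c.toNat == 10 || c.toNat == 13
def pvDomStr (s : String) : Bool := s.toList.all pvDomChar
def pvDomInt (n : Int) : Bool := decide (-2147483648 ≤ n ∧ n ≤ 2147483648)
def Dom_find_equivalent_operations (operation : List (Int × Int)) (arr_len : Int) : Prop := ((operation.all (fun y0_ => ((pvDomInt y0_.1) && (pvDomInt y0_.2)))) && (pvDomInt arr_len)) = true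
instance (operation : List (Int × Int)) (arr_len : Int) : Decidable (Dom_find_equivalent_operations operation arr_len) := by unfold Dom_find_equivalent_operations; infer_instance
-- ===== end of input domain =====

-- B precomputes the target permutation once and searches by DFS with incremental swap
-- application against a precomputed target, instead of rebuilding and re-permuting two arrays per
-- candidate (objective: alternative).

-- ===== PORT A =====
-- Python "xs[a], xs[b] = xs[b], xs[a]": RHS read first, then assigned left to right.
-- Exact where both indexes are in range (incl. negative); identity fallback where Python raises IndexError.
def pySwap (xs : List Int) (a b : Int) : List Int :=
  match PySem.List.pyGet? xs a, PySem.List.pyGet? xs b with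
  | some va, some vb => PySem.List.pySetD (PySem.List.pySetD xs a vb) b va
  | _, _ => xs

def are_same (operation1 operation2 : List (Int × Int)) (arr_len : Int) : Bool :=
  let arr1 := operation1.foldl (fun a s => pySwap a s.1 s.2) (PySem.List.pyRange 0 arr_len 1)
  let arr2 := operation2.foldl (fun a s => pySwap a s.1 s.2) (PySem.List.pyRange 0 arr_len 1)
  if arr1 = arr2 then true else false

def find_equivalent_operations (operation : List (Int × Int)) (arr_len : Int) : List (List (Int × Int)) :=
  let all_swaps := (PySem.List.pyRange 0 arr_len 1).foldl (fun acc i =>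
    (PySem.List.pyRange 0 arr_len 1).foldl (fun acc j =>
      if i ≠ j ∧ (i, j) ∉ acc ∧ (j, i) ∉ acc then acc ++ [(i, j)] else acc) acc) []
  all_swaps.foldl (fun acc e1 =>
    all_swaps.foldl (fun acc e2 =>
      let acc := if are_same operation [e1, e2] arr_len then acc ++ [[e1, e2]] else acc
      all_swaps.foldl (fun acc e3 =>
        let acc := if are_same operation [e1, e2, e3] arr_len then acc ++ [[e1, e2, e3]] else acc
        all_swaps.foldl (fun acc e4 =>
          let acc := if are_same operation [e1, e2, e3, e4] arr_len then acc ++ [[e1, e2, e3, e4]] else acc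
          all_swaps.foldl (fun acc e5 =>
            if are_same operation [e1, e2, e3, e4, e5] arr_len then acc ++ [[e1, e2, e3, e4, e5]] else acc)
            acc) acc) acc) acc) []

-- ===== PORT B =====
-- DFS of Source B: the in-place swap/undo pair around the recursive call is rendered by
-- passing the swapped array down; the appended results are returned instead of accumulated.
def dfsB (target : List Int) (swaps : List (Int × Int)) (arr : List Int) (pre : List (Int × Int)) :
    List (List (Int × Int)) :=
  (if 2 ≤ pre.length ∧ arr = target then [pre] else []) ++
  (if h : pre.length < 5 then
     swaps.flatMap (fun s => dfsB target swaps (pySwap arr s.1 s.2) (pre ++ [s]))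
   else [])
termination_by 5 - pre.length
decreasing_by simp; omega

def find_equivalent_operations_alt (operation : List (Int × Int)) (arr_len : Int) : List (List (Int × Int)) :=
  if arr_len < 2 then []  -- no swap pairs exist, so no candidate sequences
  else
    let target := operation.foldl (fun a s => pySwap a s.1 s.2) (PySem.List.pyRange 0 arr_len 1)
    let swaps := (PySem.List.pyRange 0 arr_len 1).flatMap (fun i =>
      (PySem.List.pyRange (i + 1) arr_len 1).map (fun j => (i, j)))
    dfsB target swaps (PySem.List.pyRange 0 arr_len 1) []

-- ===== PRECONDITION & SPEC =====
-- Pre_ excludes exactly the inputs where Python A raises IndexError: arr_len ≥ 2 together with a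
-- swap index outside [-arr_len, arr_len) (for arr_len ≤ 1 A's loops never apply the operation, so
-- A returns [] whatever the indices, and so does B).
def Pre_find_equivalent_operations (operation : List (Int × Int)) (arr_len : Int) : Prop :=
  2 ≤ arr_len → ∀ p ∈ operation, (-arr_len ≤ p.1 ∧ p.1 < arr_len) ∧ (-arr_len ≤ p.2 ∧ p.2 < arr_len)
instance (operation : List (Int × Int)) (arr_len : Int) : Decidable (Pre_find_equivalent_operations operation arr_len) := by unfold Pre_find_equivalent_operations; infer_instance
def pvWitness_find_equivalent_operations : (List (Int × Int)) × Int := ([(0, 1)], 2)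

def Spec_find_equivalent_operations (operation : List (Int × Int)) (arr_len : Int) (out : List (List (Int × Int))) : Prop := out = find_equivalent_operations_alt operation arr_len
instance (operation : List (Int × Int)) (arr_len : Int) (out : List (List (Int × Int))) : Decidable (Spec_find_equivalent_operations operation arr_len out) := by unfold Spec_find_equivalent_operations; infer_instance

-- ===== CLAIM (what is proved, stated in full; the proofs are below) =====
def Claim_equal_find_equivalent_operations : Prop := ∀ (operation : List (Int × Int)) (arr_len : Int), Dom_find_equivalent_operations operation arr_len → Pre_find_equivalent_operations operation arr_len → Spec_find_equivalent_operations operation arr_len (find_equivalent_operations operation arr_len)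

-- ===== LEMMAS AND PROOFS =====

-- `if c then acc ++ [x] else acc` is `acc ++ (conditional singleton)`.
theorem ifappend_push {α : Type} (c : Bool) (acc : List α) (x : α) :
    (if c then acc ++ [x] else acc) = acc ++ (if c then [x] else []) := by
  cases c <;> simp

theorem are_same_eq (op pre : List (Int × Int)) (n : Int) :
    are_same op pre n
      = decide (pre.foldl (fun a s => pySwap a s.1 s.2) (PySem.List.pyRange 0 n 1)
          = op.foldl (fun a s => pySwap a s.1 s.2) (PySem.List.pyRange 0 n 1)) := by
  by_cases h :
      op.foldl (fun a s => pySwap a s.1 s.2) (PySem.List.pyRange 0 n 1)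
        = pre.foldl (fun a s => pySwap a s.1 s.2) (PySem.List.pyRange 0 n 1) <;>
    simp [are_same, h, eq_comm]

-- Row i of A's pair table: processing j = lo..n-1 appends exactly (i, b) for b = max lo (i+1)..n-1,
-- given that acc already holds exactly the pairs of the previous rows (and of this row below lo).

theorem row_fold (n i : Int) (hi0 : 0 ≤ i) (hin : i < n) :
    ∀ (fuel : Nat) (lo : Int) (acc : List (Int × Int)),
      (n - lo).toNat = fuel → 0 ≤ lo →
      (∀ a b : Int, ((a, b) ∈ acc) ↔
        ((0 ≤ a ∧ a < i ∧ a < b ∧ b < n) ∨ (a = i ∧ i < b ∧ b < lo))) →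
      (PySem.List.pyRange lo n 1).foldl
          (fun acc j => if i ≠ j ∧ (i, j) ∉ acc ∧ (j, i) ∉ acc then acc ++ [(i, j)] else acc) acc
        = acc ++ (PySem.List.pyRange (max lo (i + 1)) n 1).map (fun b => (i, b)) := by
  intro fuel
  induction fuel with
  | zero =>
    intro lo acc hf hlo hchar
    rw [PySem.List.pyRange_one_eq_nil (show n ≤ lo by omega),
      PySem.List.pyRange_one_eq_nil (show n ≤ max lo (i + 1) by omega)]
    simp
  | succ f ih =>
    intro lo acc hf hlo hchar
    have hlon : lo < n := by omega
    rw [PySem.List.pyRange_one_cons hlon]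
    simp only [List.foldl_cons]
    rcases lt_trichotomy lo i with h | h | h
    · -- lo < i : (lo, i) already in acc, skip
      rw [if_neg (by
        rintro ⟨-, -, hni⟩
        exact hni ((hchar lo i).2 (Or.inl ⟨by omega, by omega, by omega, by omega⟩)))]
      rw [ih (lo + 1) acc (by omega) (by omega)
        (by intro a b; rw [hchar a b]; omega)]
      rw [max_eq_right (show lo + 1 ≤ i + 1 by omega), max_eq_right (show lo ≤ i + 1 by omega)]
    · -- lo = i : the i ≠ j test fails
      rw [if_neg (by rintro ⟨hne, -, -⟩; exact hne h.symm)]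
      rw [ih (lo + 1) acc (by omega) (by omega)
        (by intro a b; rw [hchar a b]; omega)]
      rw [max_eq_right (show lo + 1 ≤ i + 1 by omega), max_eq_right (show lo ≤ i + 1 by omega)]
    · -- i < lo : append (i, lo)
      rw [if_pos ⟨by omega,
        by
          intro hmem
          rcases (hchar i lo).1 hmem with ⟨-, h2, -, -⟩ | ⟨-, -, h3⟩ <;> omega,
        by
          intro hmem
          rcases (hchar lo i).1 hmem with ⟨-, h2, -, -⟩ | ⟨h1, h2, -⟩ <;> omega⟩]
      rw [ih (lo + 1) (acc ++ [(i, lo)]) (by omega) (by omega)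
        (by
          intro a b
          simp only [List.mem_append, List.mem_singleton, Prod.mk.injEq, hchar a b]
          omega)]
      rw [max_eq_left (show i + 1 ≤ lo by omega), max_eq_left (show i + 1 ≤ lo + 1 by omega),
        PySem.List.pyRange_one_cons hlon]
      simp

-- A's double loop builds exactly the i<j pairs in row-major order.
theorem outer_fold (n : Int) :
    ∀ (fuel : Nat) (i0 : Int) (acc : List (Int × Int)),
      (n - i0).toNat = fuel → 0 ≤ i0 →
      (∀ a b : Int, ((a, b) ∈ acc) ↔ (0 ≤ a ∧ a < i0 ∧ a < b ∧ b < n)) →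
      (PySem.List.pyRange i0 n 1).foldl (fun acc i =>
          (PySem.List.pyRange 0 n 1).foldl (fun acc j =>
            if i ≠ j ∧ (i, j) ∉ acc ∧ (j, i) ∉ acc then acc ++ [(i, j)] else acc) acc) acc
        = acc ++ (PySem.List.pyRange i0 n 1).flatMap (fun a =>
            (PySem.List.pyRange (a + 1) n 1).map (fun b => (a, b))) := by
  intro fuel
  induction fuel with
  | zero =>
    intro i0 acc hf hi0 hchar
    rw [PySem.List.pyRange_one_eq_nil (show n ≤ i0 by omega)]
    simp
  | succ f ih =>
    intro i0 acc hf hi0 hchar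
    have hi0n : i0 < n := by omega
    rw [PySem.List.pyRange_one_cons hi0n]
    simp only [List.foldl_cons, List.flatMap_cons]
    rw [row_fold n i0 hi0 hi0n ((n - 0).toNat) 0 acc rfl le_rfl
      (by intro a b; rw [hchar a b]; omega)]
    rw [max_eq_right (show (0:Int) ≤ i0 + 1 by omega)]
    rw [ih (i0 + 1) _ (by omega) (by omega)
      (by
        intro a b
        simp only [List.mem_append, List.mem_map, PySem.List.mem_pyRange_one, Prod.mk.injEq,
          hchar a b]
        constructor
        · rintro (h | ⟨x, ⟨hx1, hx2⟩, rfl, rfl⟩) <;> omega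
        · rintro ⟨h1, h2, h3, h4⟩
          by_cases ha : a < i0
          · exact Or.inl ⟨h1, ha, h3, h4⟩
          · exact Or.inr ⟨b, ⟨by omega, h4⟩, by omega, rfl⟩)]
    simp [List.append_assoc]

theorem allSwaps_eq (n : Int) :
    ((PySem.List.pyRange 0 n 1).foldl (fun acc i =>
        (PySem.List.pyRange 0 n 1).foldl (fun acc j =>
          if i ≠ j ∧ (i, j) ∉ acc ∧ (j, i) ∉ acc then acc ++ [(i, j)] else acc) acc) [])
      = (PySem.List.pyRange 0 n 1).flatMap (fun i =>
          (PySem.List.pyRange (i + 1) n 1).map (fun j => (i, j))) := by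
  have h := outer_fold n ((n - 0).toNat) 0 [] rfl le_rfl (by intro a b; simp only [List.mem_nil_iff, false_iff]; omega)
  simpa using h

-- For any common swap list S, A's four nested accumulation loops compute B's DFS.
theorem nest_eq (op : List (Int × Int)) (n : Int) (S : List (Int × Int)) :
    (S.foldl (fun acc e1 =>
      S.foldl (fun acc e2 =>
        S.foldl (fun acc e3 =>
          S.foldl (fun acc e4 =>
            S.foldl (fun acc e5 =>
              if are_same op [e1, e2, e3, e4, e5] n then acc ++ [[e1, e2, e3, e4, e5]] else acc)
              (if are_same op [e1, e2, e3, e4] n then acc ++ [[e1, e2, e3, e4]] else acc))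
            (if are_same op [e1, e2, e3] n then acc ++ [[e1, e2, e3]] else acc))
          (if are_same op [e1, e2] n then acc ++ [[e1, e2]] else acc)) acc) [])
      = dfsB (op.foldl (fun a s => pySwap a s.1 s.2) (PySem.List.pyRange 0 n 1)) S
          (PySem.List.pyRange 0 n 1) [] := by
  simp only [ifappend_push, List.append_assoc, PySem.List.foldl_append_eq_flatMap,
    List.nil_append]
  simp only [are_same_eq, decide_eq_true_eq, List.foldl_cons, List.foldl_nil]
  simp [dfsB]

-- For arr_len < 2 there are no i<j pairs at all.
theorem swapsB_nil (n : Int) (h : n < 2) :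
    (PySem.List.pyRange 0 n 1).flatMap (fun i =>
      (PySem.List.pyRange (i + 1) n 1).map (fun j => (i, j))) = [] := by
  rcases lt_or_ge n 1 with h1 | h1
  · rw [PySem.List.pyRange_one_eq_nil (by omega)]; rfl
  · have hn : n = 1 := by omega
    subst hn; decide

theorem main_eq (op : List (Int × Int)) (n : Int) :
    find_equivalent_operations op n = find_equivalent_operations_alt op n := by
  simp only [find_equivalent_operations, find_equivalent_operations_alt]
  rw [allSwaps_eq]
  by_cases h2 : n < 2
  · rw [if_pos h2, swapsB_nil n h2]
    rfl
  · rw [if_neg h2]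
    exact nest_eq op n _

-- ===== VERDICT (by name: the statement is the Claim_ definition above) =====
theorem find_equivalent_operations_spec : Claim_equal_find_equivalent_operations := by
  intro operation arr_len _ _
  unfold Spec_find_equivalent_operations
  exact main_eq operation arr_len
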